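-- pv_equiv track=rewrite | github.com/white8785/foobar | solution.py | solution
-- ===== SOURCE A (Python) =====
-- def is_positive(value):
--     return False if value < 0 else True
--
-- def generate_primes(number):
--     """
--     Generate a list of prime numbers using Sieve of Eratosthenes up to, and including
--     the {number} argument.
--
--     :param number: int
--     :param context: The upper limit of the prime generation range.
--     :return: An array of prime integers.
--     :rtype: list
--     """
--
--     # data validatiion
--     if not is_positive(number):
--         raise ValueError("Negative integers are not supported.")
--
--     if number <= 3:
--         raise ValueError("The number must be >= 4.")
--
--     # Optimization_1: prepopulated array to faciliate the Sieve method
--     is_prime = [True] * (number + 1)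
--
--     # special use cases
--     is_prime[0] = False
--     is_prime[1] = False
--
--     start = 2
--     for count1 in range(start, number):
--         if is_prime[count1]:
--             for count2 in range(
--                 count1 ** 2, number, count1
--             ):  # Optimization_2: check above root of n
--                 is_prime[count2] = False
--
--     primes = [prime for prime in range(number) if is_prime[prime]]
--     return primes
--
-- def solution(i):
--     """
--     Given index (i), return string of digits starting with i as index
--     from a string of prime numbers.
--     """
--     # data validation
--     if not i >= 0 and i <= 10000:
--         raise ValueError("Your number is out of range")
--
--     range = i + 5
--     primes = generate_primes(30000)
--
--     string_of_primes = ""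
--     for prime in primes:
--         string_of_primes += str(prime)
--
--     return string_of_primes[i:range]
-- ===== SOURCE B (Python) =====
-- def solution(i):
--     """
--     Given index (i), return string of digits starting with i as index
--     from a string of prime numbers.
--     """
--     if i < 0:
--         raise ValueError("Your number is out of range")
--     primes = []
--     for n in range(2, 30000):
--         d = 2
--         while d * d <= n and n % d != 0:
--             d += 1
--         if d * d > n:
--             primes.append(n)
--     s = "".join(map(str, primes))
--     return s[i:i + 5]
-- ===== Notes on version B (the rewrite author's own statement) =====
-- stated objective: simpler
-- what changed: Replaces the Sieve-of-Eratosthenes (a 30001-cell boolean table mutated by nested marking loops) with direct trial division up to the square root for each candidate, and builds the digit string with one join over a comprehension instead of repeated string concatenation.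
import Mathlib
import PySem

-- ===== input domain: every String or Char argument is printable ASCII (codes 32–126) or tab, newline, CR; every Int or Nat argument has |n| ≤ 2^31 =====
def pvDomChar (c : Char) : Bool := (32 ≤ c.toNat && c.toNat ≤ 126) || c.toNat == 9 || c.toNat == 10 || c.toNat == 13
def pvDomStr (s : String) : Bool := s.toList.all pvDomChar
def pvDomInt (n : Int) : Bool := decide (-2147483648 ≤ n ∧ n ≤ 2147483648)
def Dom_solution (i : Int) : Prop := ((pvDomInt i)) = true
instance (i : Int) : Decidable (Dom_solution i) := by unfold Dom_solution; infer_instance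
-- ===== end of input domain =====

-- B replaces A's Sieve-of-Eratosthenes prime generation by trial division up to the square
-- root and builds the digit string with one join over a comprehension (objective: simpler).

-- ===== PORT A =====
def isPositive (v : Int) : Bool := if v < 0 then false else true

-- generate_primes; `none` = its ValueError (unreachable from `solution`, which passes 30000)
def generatePrimes (number : Int) : Option (List Int) :=
  if !(isPositive number) then none
  else if number ≤ 3 then none
  else
    -- is_prime = [True] * (number + 1); is_prime[0] = False; is_prime[1] = False
    -- (the Python list is random-access, mutated in place: Array Bool; every index below is
    --  nonnegative and within bounds, so set!/getD are exact for Python's l[i] here)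
    let isPrime : Array Bool := ((Array.replicate (number.toNat + 1) true).set! 0 false).set! 1 false
    -- for count1 in range(2, number): if is_prime[count1]: for count2 in range(count1**2, number, count1): is_prime[count2] = False
    let final : Array Bool := (PySem.List.pyRange 2 number 1).foldl
      (fun a c =>
        if a.getD c.toNat false then
          (PySem.List.pyRange (c ^ 2) number c).foldl (fun a' k => a'.set! k.toNat false) a
        else a) isPrime
    some ((PySem.List.pyRange 0 number 1).filter (fun p => final.getD p.toNat false))

def solution (i : Int) : String :=
  if ¬ i ≥ 0 ∧ i ≤ 10000 then ""   -- Python: raise ValueError (exactly i < 0; outside Pre_solution)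
  else
    let r : Int := i + 5
    match generatePrimes 30000 with
    | none => ""   -- unreachable: 30000 passes generate_primes' validation
    | some primes =>
      let s : String := primes.foldl (fun acc p => acc ++ PySem.Int.toStr p) ""
      PySem.Str.slice s (some i) (some r)

-- ===== PORT B =====
-- the while-loop of Source B's _is_prime; d is the loop variable (starts at 2)
def isPrimeTrial (n d : Nat) : Bool :=
  if h : d * d ≤ n then (if n % d = 0 then false else isPrimeTrial n (d + 1)) else true
  termination_by n + 1 - d
  decreasing_by
    have hd : d ≤ n := by
      rcases Nat.eq_zero_or_pos d with h0 | h0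
      · omega
      · exact le_trans (Nat.le_mul_of_pos_left d h0) h
    omega

def solution_alt (i : Int) : String :=
  if i < 0 then ""   -- Python: raise ValueError (outside Pre_solution)
  else
    let s : String := PySem.Str.join ""
      (((PySem.List.pyRange 2 30000 1).filter (fun n => isPrimeTrial n.toNat 2)).map PySem.Int.toStr)
    PySem.Str.slice s (some i) (some (i + 5))

-- ===== PRECONDITION & SPEC =====
-- Pre_ excludes exactly the inputs i < 0, on which A (and B) raise ValueError.
def Pre_solution (i : Int) : Prop := 0 ≤ i
instance (i : Int) : Decidable (Pre_solution i) := by unfold Pre_solution; infer_instance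
def pvWitness_solution : Int := (7)
def Spec_solution (i : Int) (out : String) : Prop := out = solution_alt i
instance (i : Int) (out : String) : Decidable (Spec_solution i out) := by unfold Spec_solution; infer_instance

-- ===== CLAIM (what is proved, stated in full; the proofs are below) =====
def Claim_equal_solution : Prop := ∀ (i : Int), Dom_solution i → Pre_solution i → Spec_solution i (solution i)

-- ===== LEMMAS AND PROOFS =====

-- the pieces of `generatePrimes 30000` (Array side = the port; List side = proof model)
def sieveInitA : Array Bool :=
  ((Array.replicate ((30000 : Int).toNat + 1) true).set! 0 false).set! 1 false
def sieveStepA (a : Array Bool) (c : Int) : Array Bool :=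
  if a.getD c.toNat false then
    (PySem.List.pyRange (c ^ 2) 30000 c).foldl (fun a' k => a'.set! k.toNat false) a
  else a
def sieveFinalA : Array Bool := (PySem.List.pyRange 2 30000 1).foldl sieveStepA sieveInitA
def primesA : List Int := (PySem.List.pyRange 0 30000 1).filter (fun p => sieveFinalA.getD p.toNat false)

lemma genEq : generatePrimes 30000 = some primesA := by
  rw [generatePrimes]
  rw [if_neg (by decide), if_neg (by decide)]
  rfl

def sieveInit : List Bool := ((List.replicate ((30000 : Int).toNat + 1) true).set 0 false).set 1 false
def sieveStep (l : List Bool) (c : Int) : List Bool :=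
  if PySem.List.pyGetD l c false then
    (PySem.List.pyRange (c ^ 2) 30000 c).foldl (fun l' k => PySem.List.pySetD l' k false) l
  else l
def sieveFinal : List Bool := (PySem.List.pyRange 2 30000 1).foldl sieveStep sieveInit

lemma arrGetD_toList (a : Array Bool) (n : Nat) : a.getD n false = a.toList.getD n false := by
  unfold Array.getD
  split
  · rename_i h
    rw [List.getD_eq_getElem?_getD, List.getElem?_eq_getElem (by simpa using h)]
    simp
  · rename_i h
    rw [List.getD_eq_getElem?_getD, List.getElem?_eq_none (by simpa using h)]
    rfl

lemma markFoldA (ks : List Int) (a : Array Bool) (hks : ∀ k ∈ ks, 0 ≤ k) :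
    (ks.foldl (fun a' k => a'.set! k.toNat false) a).toList
      = ks.foldl (fun l k => PySem.List.pySetD l k false) a.toList := by
  induction ks generalizing a with
  | nil => rfl
  | cons k ks ih =>
    simp only [List.foldl_cons]
    rw [ih _ (fun x hx => hks x (List.mem_cons_of_mem _ hx))]
    rw [PySem.List.pySetD_of_nonneg _ _ (hks k List.mem_cons_self)]
    rw [show (Array.set! a k.toNat false) = a.setIfInBounds k.toNat false from rfl,
      Array.toList_setIfInBounds]

lemma stepA_toList (a : Array Bool) (c : Int) (hc : 0 ≤ c)
    (hks : ∀ k ∈ PySem.List.pyRange (c ^ 2) 30000 c, 0 ≤ k) :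
    (sieveStepA a c).toList = sieveStep a.toList c := by
  unfold sieveStepA sieveStep
  rw [PySem.List.pyGetD_of_nonneg _ _ hc, ← arrGetD_toList]
  by_cases h : a.getD c.toNat false = true
  · rw [if_pos h, if_pos h]
    exact markFoldA _ _ hks
  · rw [if_neg h, if_neg h]

lemma finalA_toList_aux (cs : List Int) : (∀ c ∈ cs, 0 < c) → ∀ a : Array Bool,
    (cs.foldl sieveStepA a).toList = cs.foldl sieveStep a.toList := by
  induction cs with
  | nil => intro _ a; rfl
  | cons c cs ih =>
    intro hcs a
    simp only [List.foldl_cons]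
    rw [ih (fun x hx => hcs x (List.mem_cons_of_mem _ hx)) _]
    rw [stepA_toList a c (le_of_lt (hcs c List.mem_cons_self))]
    intro k hk
    have h := (PySem.List.mem_pyRange_iff_of_pos (hcs c List.mem_cons_self) k).mp hk
    nlinarith [h.1]

lemma initA_toList : sieveInitA.toList = sieveInit := by
  unfold sieveInitA sieveInit
  rw [show ∀ (x : Array Bool) (i : Nat) (v : Bool), x.set! i v = x.setIfInBounds i v
      from fun _ _ _ => rfl]
  rw [show ∀ (x : Array Bool) (i : Nat) (v : Bool), x.set! i v = x.setIfInBounds i v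
      from fun _ _ _ => rfl]
  rw [Array.toList_setIfInBounds, Array.toList_setIfInBounds, Array.toList_replicate]

lemma finalA_getD (n : Nat) : sieveFinalA.getD n false = sieveFinal.getD n false := by
  rw [arrGetD_toList]
  unfold sieveFinalA sieveFinal
  rw [finalA_toList_aux _ (fun c hc => by
      have := PySem.List.mem_pyRange_one.mp hc; omega) _, initA_toList]

-- after processing count1 = 2..m, cell n has been cleared iff `marked m n`
def marked (m n : Nat) : Prop := n < 2 ∨ (n < 30000 ∧ ∃ d, 2 ≤ d ∧ d ≤ m ∧ d ∣ n ∧ d * d ≤ n)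

lemma markFold_getD (ks : List Int) (l : List Bool) (n : Nat) (hks : ∀ k ∈ ks, 0 ≤ k) :
    (ks.foldl (fun l' k => PySem.List.pySetD l' k false) l).getD n false
      = if (n : Int) ∈ ks then false else l.getD n false := by
  induction ks generalizing l with
  | nil => simp
  | cons k ks ih =>
    have hk : 0 ≤ k := hks k (by simp)
    simp only [List.foldl_cons]
    rw [ih _ (fun x hx => hks x (by simp [hx])), PySem.List.pySetD_of_nonneg _ _ hk]
    by_cases hmem : (n : Int) ∈ ks
    · simp [hmem]
    · simp only [List.mem_cons, hmem, or_false]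
      by_cases hnk : (n : Int) = k
      · have hkn : k.toNat = n := by omega
        rw [if_pos hnk, hkn]
        simp [List.getD, List.getElem?_set_self']
        cases hlt : decide (n < l.length) <;> simp_all
      · have hkn : k.toNat ≠ n := by omega
        rw [if_neg hnk]
        simp [List.getD, List.getElem?_set_ne hkn]

lemma markFold_length (ks : List Int) (l : List Bool) :
    (ks.foldl (fun l' k => PySem.List.pySetD l' k false) l).length = l.length := by
  induction ks generalizing l with
  | nil => rfl
  | cons k ks ih => simp only [List.foldl_cons]; rw [ih, PySem.List.length_pySetD]

lemma sieveFoldl_length (cs : List Int) (l : List Bool) :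
    (cs.foldl sieveStep l).length = l.length := by
  induction cs generalizing l with
  | nil => rfl
  | cons c cs ih =>
    simp only [List.foldl_cons]
    rw [ih]
    unfold sieveStep
    split
    · exact markFold_length _ _
    · rfl

lemma sieveInit_length : sieveInit.length = 30001 := by
  unfold sieveInit
  rw [List.length_set, List.length_set, List.length_replicate]
  decide

lemma sieveInit_getD (n : Nat) (hn : n ≤ 30000) : (sieveInit.getD n false = false ↔ n < 2) := by
  have h1 : (30000 : Int).toNat + 1 = 30001 := by decide
  unfold sieveInit
  rw [h1, List.getD_eq_getElem?_getD, List.getElem?_set, List.getElem?_set]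
  simp only [List.length_set, List.length_replicate, List.getElem?_replicate]
  split_ifs <;> simp_all <;> omega

lemma marked_mono (m n : Nat) (h : marked m n) : marked (m + 1) n := by
  unfold marked at *
  rcases h with h | ⟨h1, d, hd⟩
  · exact Or.inl h
  · exact Or.inr ⟨h1, d, hd.1, by omega, hd.2.2⟩

lemma sieveInv (m : Nat) : m ≤ 29999 → ∀ n : Nat, n ≤ 30000 →
    ((((PySem.List.pyRange 2 ((m : Int) + 1) 1).foldl sieveStep sieveInit).getD n false = false)
      ↔ marked m n) := by
  induction m with
  | zero =>
    intro _ n hn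
    rw [PySem.List.pyRange_one_eq_nil (by norm_num)]
    simp only [List.foldl_nil]
    rw [sieveInit_getD n hn]
    unfold marked
    constructor
    · exact Or.inl
    · rintro (h | ⟨_, d, _, hdm, _⟩)
      · exact h
      · omega
  | succ m ih =>
    intro hm n hn
    rcases Nat.eq_zero_or_pos m with rfl | hm1
    · -- m + 1 = 1 : range(2, 2) is still empty
      rw [show (((0 : Nat) + 1 : Nat) : Int) + 1 = 2 by norm_num]
      rw [PySem.List.pyRange_one_eq_nil (by norm_num)]
      simp only [List.foldl_nil]
      rw [sieveInit_getD n hn]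
      unfold marked
      constructor
      · exact Or.inl
      · rintro (h | ⟨_, d, _, hdm, _⟩)
        · exact h
        · omega
    · have hcast : (((m + 1 : Nat) : Int) + 1) = ((m : Int) + 1) + 1 := by push_cast; ring
      rw [hcast, PySem.List.pyRange_one_succ_right (by exact_mod_cast by omega), List.foldl_append]
      simp only [List.foldl_cons, List.foldl_nil]
      set L : List Bool := (PySem.List.pyRange 2 ((m : Int) + 1) 1).foldl sieveStep sieveInit with hL
      have ihL : ∀ j : Nat, j ≤ 30000 → (L.getD j false = false ↔ marked m j) := by
        intro j hj; exact ih (by omega) j hj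
      have hlenL : L.length = 30001 := by rw [hL, sieveFoldl_length, sieveInit_length]
      have hc0 : (0 : Int) ≤ (m : Int) + 1 := by positivity
      have hct : ((m : Int) + 1).toNat = m + 1 := by omega
      have hget : PySem.List.pyGetD L ((m : Int) + 1) false = L.getD (m + 1) false := by
        rw [PySem.List.pyGetD_of_nonneg _ _ hc0, hct]
      by_cases hc : L.getD (m + 1) false = false
      · -- is_prime[count1] is False: nothing is marked in this pass
        have hmk : marked m (m + 1) := (ihL (m + 1) (by omega)).mp hc
        unfold sieveStep
        rw [hget, hc]
        simp only [Bool.false_eq_true, if_false]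
        rw [ihL n hn]
        constructor
        · exact marked_mono m n
        · rintro (h | ⟨h1, d, hd2, hdm, hdvd, hsq⟩)
          · exact Or.inl h
          · rcases Nat.lt_or_ge d (m + 1) with hlt | hge
            · exact Or.inr ⟨h1, d, hd2, by omega, hdvd, hsq⟩
            · -- d = m + 1; use the small divisor of m + 1 provided by hmk
              have hdm1 : d = m + 1 := by omega
              subst hdm1
              rcases hmk with h' | ⟨_, e, he2, hem, hedvd, hesq⟩
              · omega
              · refine Or.inr ⟨h1, e, he2, hem, dvd_trans hedvd hdvd, ?_⟩
                exact le_trans hesq (le_trans (Nat.le_mul_of_pos_left (m + 1) (by omega)) hsq)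
      · -- is_prime[count1] is True: mark the multiples from count1**2 on
        have hct2 : L.getD (m + 1) false = true := by
          cases h : L.getD (m + 1) false
          · exact absurd h hc
          · rfl
        have hnm : ¬ marked m (m + 1) := fun h => hc ((ihL (m + 1) (by omega)).mpr h)
        unfold sieveStep
        rw [hget, hct2, if_pos rfl]
        have hcpos : (0 : Int) < (m : Int) + 1 := by positivity
        have hks : ∀ k ∈ PySem.List.pyRange (((m : Int) + 1) ^ 2) 30000 ((m : Int) + 1), 0 ≤ k := by
          intro k hk
          have := (PySem.List.mem_pyRange_iff_of_pos hcpos k).mp hk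
          nlinarith [this.1]
        rw [markFold_getD _ _ _ hks]
        have hmemiff : ((n : Int) ∈ PySem.List.pyRange (((m : Int) + 1) ^ 2) 30000 ((m : Int) + 1))
            ↔ ((m + 1) * (m + 1) ≤ n ∧ n < 30000 ∧ (m + 1) ∣ n) := by
          rw [PySem.List.mem_pyRange_iff_of_pos hcpos]
          have hdvdsq : ((m : Int) + 1) ∣ ((m : Int) + 1) ^ 2 := dvd_pow_self _ two_ne_zero
          constructor
          · rintro ⟨ha, hb, hd⟩
            have hdn : ((m : Int) + 1) ∣ (n : Int) := by
              have := dvd_add hd hdvdsq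
              simpa using this
            refine ⟨?_, by exact_mod_cast hb, ?_⟩
            · have : ((m : Int) + 1) ^ 2 ≤ (n : Int) := ha
              have h2 : ((m + 1 : Nat) : Int) * ((m + 1 : Nat) : Int) ≤ (n : Int) := by push_cast; nlinarith
              exact_mod_cast h2
            · exact_mod_cast hdn
          · rintro ⟨ha, hb, hd⟩
            refine ⟨?_, by exact_mod_cast hb, ?_⟩
            · have h2 : ((m + 1 : Nat) : Int) * ((m + 1 : Nat) : Int) ≤ (n : Int) := by exact_mod_cast ha
              nlinarith
            · exact dvd_sub (by exact_mod_cast hd) hdvdsq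
        by_cases hmem : (n : Int) ∈ PySem.List.pyRange (((m : Int) + 1) ^ 2) 30000 ((m : Int) + 1)
        · rw [if_pos hmem]
          rcases hmemiff.mp hmem with ⟨ha, hb, hd⟩
          simp only [true_iff]
          exact Or.inr ⟨hb, m + 1, by omega, le_refl _, hd, ha⟩
        · rw [if_neg hmem, ihL n hn]
          constructor
          · exact marked_mono m n
          · rintro (h | ⟨h1, d, hd2, hdm, hdvd, hsq⟩)
            · exact Or.inl h
            · rcases Nat.lt_or_ge d (m + 1) with hlt | hge
              · exact Or.inr ⟨h1, d, hd2, by omega, hdvd, hsq⟩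
              · have hdm1 : d = m + 1 := by omega
                subst hdm1
                exact absurd (hmemiff.mpr ⟨hsq, h1, hdvd⟩) hmem

lemma sieveFinal_getD (n : Nat) (hn : n ≤ 30000) :
    (sieveFinal.getD n false = false ↔ marked 29999 n) := by
  have h := sieveInv 29999 (by norm_num) n hn
  norm_num at h
  exact h

lemma marked_final (n : Nat) (h2 : n < 30000) :
    marked 29999 n ↔ (n < 2 ∨ ∃ d, 2 ≤ d ∧ d ∣ n ∧ d * d ≤ n) := by
  unfold marked
  constructor
  · rintro (h | ⟨_, d, hd2, _, hdvd, hsq⟩)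
    · exact Or.inl h
    · exact Or.inr ⟨d, hd2, hdvd, hsq⟩
  · rintro (h | ⟨d, hd2, hdvd, hsq⟩)
    · exact Or.inl h
    · have hdd : d ≤ d * d := Nat.le_mul_of_pos_left d (by omega)
      exact Or.inr ⟨h2, d, hd2, by omega, hdvd, hsq⟩

lemma isPrimeTrialAux (n : Nat) : ∀ k d : Nat, n + 1 - d ≤ k →
    (isPrimeTrial n d = true ↔ ¬ ∃ e, d ≤ e ∧ e * e ≤ n ∧ e ∣ n) := by
  intro k
  induction k with
  | zero =>
    intro d hk
    have hgt : ¬ d * d ≤ n := by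
      intro hle
      have h1 : 1 ≤ d := by omega
      have : d ≤ d * d := Nat.le_mul_of_pos_left d (by omega)
      omega
    rw [isPrimeTrial, dif_neg hgt]
    simp only [true_iff]
    rintro ⟨e, hde, hsq, _⟩
    exact hgt (le_trans (Nat.mul_le_mul hde hde) hsq)
  | succ k ih =>
    intro d hk
    rw [isPrimeTrial]
    by_cases h : d * d ≤ n
    · rw [dif_pos h]
      by_cases h2 : n % d = 0
      · rw [if_pos h2]
        simp only [Bool.false_eq_true, false_iff, not_not]
        exact ⟨d, le_refl d, h, Nat.dvd_of_mod_eq_zero h2⟩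
      · rw [if_neg h2, ih (d + 1) (by omega)]
        constructor
        · rintro hne ⟨e, hde, hsq, hdvd⟩
          rcases Nat.lt_or_ge d e with hlt | hge
          · exact hne ⟨e, by omega, hsq, hdvd⟩
          · have he : e = d := by omega
            subst he
            obtain ⟨j, rfl⟩ := hdvd
            simp [Nat.mul_mod_right] at h2
        · rintro hne ⟨e, hde, hsq, hdvd⟩
          exact hne ⟨e, by omega, hsq, hdvd⟩
    · rw [dif_neg h]
      simp only [true_iff]
      rintro ⟨e, hde, hsq, _⟩
      exact h (le_trans (Nat.mul_le_mul hde hde) hsq)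

lemma isPrimeTrial_iff (n d : Nat) :
    isPrimeTrial n d = true ↔ ¬ ∃ e, d ≤ e ∧ e * e ≤ n ∧ e ∣ n :=
  isPrimeTrialAux n (n + 1 - d) d (le_refl _)

lemma prefix_empty :
    (PySem.List.pyRange (0 : Int) 2).filter (fun p => sieveFinalA.getD p.toNat false) = [] := by
  rw [List.filter_eq_nil_iff]
  intro a ha
  rcases PySem.List.mem_pyRange_one.mp ha with ⟨h0, h2⟩
  show ¬ (sieveFinalA.getD a.toNat false = true)
  rw [finalA_getD]
  rw [(sieveFinal_getD a.toNat (by omega)).mpr (Or.inl (by omega))]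
  exact Bool.false_ne_true

lemma primes_eq :
    primesA = (PySem.List.pyRange 2 30000 1).filter (fun n => isPrimeTrial n.toNat 2) := by
  unfold primesA
  rw [PySem.List.pyRange_one_append 0 2 30000 (by norm_num) (by norm_num), List.filter_append,
    prefix_empty, List.nil_append]
  apply List.filter_congr
  intro x hx
  rcases PySem.List.mem_pyRange_one.mp hx with ⟨hx2, hx30⟩
  have hk2 : 2 ≤ x.toNat := by omega
  have hk30 : x.toNat < 30000 := by omega
  show sieveFinalA.getD x.toNat false = isPrimeTrial x.toNat 2
  rw [finalA_getD]
  rw [Bool.eq_iff_iff]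
  have hfin := sieveFinal_getD x.toNat (by omega)
  have hmk := marked_final x.toNat hk30
  rw [isPrimeTrial_iff]
  constructor
  · intro htrue
    have hnm : ¬ marked 29999 x.toNat := by
      intro hm
      rw [hfin.mpr hm] at htrue
      exact Bool.false_ne_true htrue
    rw [hmk] at hnm
    rintro ⟨e, he2, hesq, hedvd⟩
    exact hnm (Or.inr ⟨e, he2, hedvd, hesq⟩)
  · intro hne
    cases hval : sieveFinal.getD x.toNat false
    · exfalso
      rcases hmk.mp (hfin.mp hval) with h | ⟨d, hd2, hdvd, hsq⟩
      · omega
      · exact hne ⟨d, hd2, hsq, hdvd⟩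
    · rfl

lemma chars_join_empty_sep (css : List (List Char)) : PySem.Chars.join [] css = css.flatten := by
  induction css with
  | nil => simp [PySem.Chars.join_nil]
  | cons a rest ih =>
    cases rest with
    | nil => simp [PySem.Chars.join_singleton]
    | cons b r =>
      rw [PySem.Chars.join_cons_cons]
      simp only [List.flatten_cons]
      rw [ih]
      simp

lemma foldl_toStr_toList (ps : List Int) (a : String) :
    (ps.foldl (fun acc p => acc ++ PySem.Int.toStr p) a).toList
      = a.toList ++ (ps.map (fun p => (PySem.Int.toStr p).toList)).flatten := by
  induction ps generalizing a with
  | nil => simp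
  | cons x xs ih => simp [ih, String.toList_append]

lemma join_empty_eq_foldl (ps : List Int) :
    ps.foldl (fun acc p => acc ++ PySem.Int.toStr p) "" = PySem.Str.join "" (ps.map PySem.Int.toStr) := by
  apply String.toList_inj.mp
  rw [PySem.Str.toList_join, show ("" : String).toList = [] from rfl, chars_join_empty_sep,
    foldl_toStr_toList]
  simp [List.map_map, Function.comp_def, PySem.Int.toList_toStr]

-- ===== VERDICT (by name: the statement is the Claim_ definition above) =====
theorem solution_spec : Claim_equal_solution := by
  intro i _ hpre
  unfold Spec_solution solution solution_alt
  rw [genEq]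
  have h1 : ¬ (¬ i ≥ 0 ∧ i ≤ 10000) := fun h => h.1 hpre
  have h2 : ¬ i < 0 := by omega
  rw [if_neg h1, if_neg h2]
  simp only []
  rw [join_empty_eq_foldl, primes_eq]
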